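-- pv_equiv track=rewrite | github.com/Sangyu-Han/SpecLens | scripts/run_prompt_axis_pilot.py | _normalize_ranking
-- ===== SOURCE A (Python) =====
-- def _normalize_ranking(best_candidate: str, ranked_candidates: list[str], valid_codes: list[str]) -> list[str]:
--     valid = [str(code).lower() for code in valid_codes]
--     seen: set[str] = set()
--     ordered: list[str] = []
--     for code in [str(best_candidate).lower(), *[str(v).lower() for v in ranked_candidates]]:
--         if code in valid and code not in seen:
--             ordered.append(code)
--             seen.add(code)
--     for code in valid:
--         if code not in seen:
--             ordered.append(code)
--             seen.add(code)
--     return ordered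
-- ===== SOURCE B (Python) =====
-- def _normalize_ranking(best_candidate: str, ranked_candidates: list[str], valid_codes: list[str]) -> list[str]:
--     candidates = [str(best_candidate).lower()] + [str(v).lower() for v in ranked_candidates]
--     deduped = list(dict.fromkeys(str(code).lower() for code in valid_codes))
--     rank = {}
--     for code in candidates + deduped:
--         rank.setdefault(code, len(rank))
--     return sorted(deduped, key=lambda code: rank[code])
-- ===== Notes on version B (the rewrite author's own statement) =====
-- stated objective: faster
-- what changed: Replaces A's two seen-set-guarded accumulation loops (with an O(v) list membership test 'code in valid' inside the candidate loop) by a first-occurrence rank dictionary built over candidates + deduped valid codes and a single sort of the deduped valid codes by that rank.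
import Mathlib
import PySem

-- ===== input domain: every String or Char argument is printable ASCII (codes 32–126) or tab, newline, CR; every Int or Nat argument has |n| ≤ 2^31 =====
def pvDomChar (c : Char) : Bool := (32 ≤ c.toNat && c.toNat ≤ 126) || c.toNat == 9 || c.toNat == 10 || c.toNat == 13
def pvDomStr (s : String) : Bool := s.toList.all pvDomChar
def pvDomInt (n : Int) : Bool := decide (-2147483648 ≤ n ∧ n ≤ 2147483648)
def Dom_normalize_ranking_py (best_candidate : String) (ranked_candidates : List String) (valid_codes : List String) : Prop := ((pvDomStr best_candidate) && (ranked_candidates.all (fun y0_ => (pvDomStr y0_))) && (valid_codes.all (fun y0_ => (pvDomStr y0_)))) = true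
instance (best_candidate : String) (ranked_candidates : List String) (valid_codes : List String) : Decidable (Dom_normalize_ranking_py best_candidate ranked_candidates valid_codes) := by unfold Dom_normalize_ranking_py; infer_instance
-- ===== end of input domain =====

-- B replaces A's two seen-guarded accumulation loops (A tests 'code in valid' by a list scan)
-- by a first-occurrence rank table over candidates ++ deduped valid codes and one sort of the
-- deduped valid codes by that rank (objective: faster, measured).

-- ===== PORT A =====
def normalize_ranking_py (best_candidate : String) (ranked_candidates : List String) (valid_codes : List String) : List String :=
  -- valid = [str(code).lower() for code in valid_codes]
  let valid := valid_codes.map PySem.Str.lower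
  -- first loop over [str(best_candidate).lower(), *[str(v).lower() for v in ranked_candidates]]
  let st1 := (PySem.Str.lower best_candidate :: ranked_candidates.map PySem.Str.lower).foldl
    (fun (st : PySem.Set String × List String) code =>
      if valid.contains code && !(PySem.Set.contains st.1 code) then
        (PySem.Set.add st.1 code, st.2 ++ [code])
      else st)
    (PySem.Set.empty, [])
  -- second loop over valid
  let st2 := valid.foldl
    (fun (st : PySem.Set String × List String) code =>
      if !(PySem.Set.contains st.1 code) then
        (PySem.Set.add st.1 code, st.2 ++ [code])
      else st)
    st1
  st2.2

-- ===== PORT B =====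
def normalize_ranking_py_alt (best_candidate : String) (ranked_candidates : List String) (valid_codes : List String) : List String :=
  -- candidates = [str(best_candidate).lower()] + [str(v).lower() for v in ranked_candidates]
  let candidates := PySem.Str.lower best_candidate :: ranked_candidates.map PySem.Str.lower
  -- deduped = list(dict.fromkeys(str(code).lower() for code in valid_codes))
  let deduped := PySem.List.dedup (valid_codes.map PySem.Str.lower)
  -- rank = {}; for code in candidates + deduped: rank.setdefault(code, len(rank))
  let rank : PySem.Dict String Int := (candidates ++ deduped).foldl
    (fun d code => PySem.Dict.setdefault d code ((PySem.Dict.size d : Int))) PySem.Dict.empty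
  -- sorted(deduped, key=lambda code: rank[code]) — rank was built over candidates + deduped, so
  -- every code of deduped is a key of rank and Python's rank[code] never raises (getD's default is unreachable)
  PySem.List.sorted deduped (fun code => PySem.Dict.getD rank code 0)

-- ===== PRECONDITION & SPEC =====
def Spec_normalize_ranking_py (best_candidate : String) (ranked_candidates : List String) (valid_codes : List String) (out : List String) : Prop := out = normalize_ranking_py_alt best_candidate ranked_candidates valid_codes
instance (best_candidate : String) (ranked_candidates : List String) (valid_codes : List String) (out : List String) : Decidable (Spec_normalize_ranking_py best_candidate ranked_candidates valid_codes out) := by unfold Spec_normalize_ranking_py; infer_instance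

-- ===== CLAIM (what is proved, stated in full; the proofs are below) =====
def Claim_equal_normalize_ranking_py : Prop := ∀ (best_candidate : String) (ranked_candidates : List String) (valid_codes : List String), Dom_normalize_ranking_py best_candidate ranked_candidates valid_codes → Spec_normalize_ranking_py best_candidate ranked_candidates valid_codes (normalize_ranking_py best_candidate ranked_candidates valid_codes)

-- ===== LEMMAS AND PROOFS =====

theorem contains_true_iff {s : List String} {c : String} : s.contains c = true ↔ c ∈ s := List.contains_iff_mem
theorem ltm {s : List String} {c : String} (h : c ∈ s) : s.contains c = true := by simp [h]
theorem ltn {s : List String} {c : String} (h : c ∉ s) : s.contains c = false := by simp [h]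
theorem ctm {s : List String} {c : String} (h : c ∈ s) : PySem.Set.contains s c = true := by
  simp [PySem.Set.contains, h]

-- `dsel p l s` = the codes of l that satisfy p and are not yet "seen" (in s), first occurrences, in order;
-- the common shape of both of A's loops (p = membership in valid, resp. p = always true).
def dsel (p : String → Bool) : List String → List String → List String
  | [], _ => []
  | c :: cs, s => if p c = true ∧ c ∉ s then c :: dsel p cs (s ++ [c]) else dsel p cs s

-- (0) dsel only depends on the membership of the seen list
theorem dsel_congr (p : String → Bool) (l : List String) (s s' : List String)
    (h : ∀ x, x ∈ s ↔ x ∈ s') : dsel p l s = dsel p l s' := by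
  induction l generalizing s s' with
  | nil => rfl
  | cons c cs ih =>
    by_cases hc : p c = true ∧ c ∉ s
    · rw [dsel, dsel, if_pos hc, if_pos ⟨hc.1, fun hm => hc.2 ((h c).mpr hm)⟩]
      exact congrArg _ (ih _ _ (fun x => by simp only [List.mem_append]; rw [h x]))
    · rw [dsel, dsel, if_neg hc, if_neg (fun hc' => hc ⟨hc'.1, fun hm => hc'.2 ((h c).mp hm)⟩)]
      exact ih _ _ h

-- (1) membership in dsel
theorem mem_dsel (p : String → Bool) (l : List String) (s : List String) (x : String) :
    x ∈ dsel p l s ↔ x ∈ l ∧ p x = true ∧ x ∉ s := by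
  induction l generalizing s with
  | nil => simp [dsel]
  | cons c cs ih =>
    by_cases hic : p c = true ∧ c ∉ s
    · rw [dsel, if_pos hic]
      by_cases hxc : x = c
      · subst hxc
        simp [hic.1, hic.2]
      · simp only [List.mem_cons, hxc, false_or, ih, List.mem_append]
        tauto
    · rw [dsel, if_neg hic, ih]
      constructor
      · rintro ⟨h1, h2, h3⟩; exact ⟨List.mem_cons_of_mem _ h1, h2, h3⟩
      · rintro ⟨h1, h2, h3⟩
        rcases List.mem_cons.mp h1 with h | h
        · subst h
          rcases Decidable.not_and_iff_not_or_not.mp hic with h' | h'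
          · exact absurd h2 h'
          · exact absurd (Decidable.not_not.mp h') h3
        · exact ⟨h, h2, h3⟩

theorem nodup_snoc (s : List String) (c : String) (hs : s.Nodup) (hc : c ∉ s) :
    (s ++ [c]).Nodup := by
  refine List.Nodup.append hs (List.nodup_singleton c) ?_
  intro a ha hb
  have hb' : a = c := by simpa using hb
  exact hc (hb' ▸ ha)

-- (2) seen ++ dsel is duplicate-free
theorem nodup_append_dsel (p : String → Bool) (l : List String) (s : List String)
    (hs : s.Nodup) : (s ++ dsel p l s).Nodup := by
  induction l generalizing s with
  | nil => simpa [dsel]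
  | cons c cs ih =>
    by_cases hic : p c = true ∧ c ∉ s
    · rw [dsel, if_pos hic]
      have : s ++ c :: dsel p cs (s ++ [c]) = (s ++ [c]) ++ dsel p cs (s ++ [c]) := by simp
      rw [this]
      exact ih (s ++ [c]) (nodup_snoc s c hs hic.2)
    · rw [dsel, if_neg hic]; exact ih s hs

-- (5) dsel over an append splits
theorem dsel_append (p : String → Bool) (X Y : List String) (s : List String) :
    dsel p (X ++ Y) s = dsel p X s ++ dsel p Y (s ++ dsel p X s) := by
  induction X generalizing s with
  | nil => simp [dsel]
  | cons c cs ih =>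
    by_cases hic : p c = true ∧ c ∉ s
    · rw [List.cons_append, dsel, dsel, if_pos hic, if_pos hic, ih (s ++ [c])]
      simp
    · rw [List.cons_append, dsel, dsel, if_neg hic, if_neg hic, ih s]

-- (6) a p-filtered pass is a sublist of the unfiltered pass (t collects skipped p-false codes)
theorem dsel_sublist_aux (p : String → Bool) (l : List String) (s t : List String)
    (ht : ∀ x ∈ t, p x = false) (hts : ∀ x ∈ t, x ∉ s) :
    List.Sublist (dsel p l s) (dsel (fun _ => true) l (s ++ t)) := by
  induction l generalizing s t with
  | nil => simp [dsel]
  | cons c cs ih =>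
    by_cases hcs : c ∈ s
    · rw [dsel, if_neg (fun h => h.2 hcs), dsel,
        if_neg (fun h => h.2 (List.mem_append.mpr (Or.inl hcs)))]
      exact ih s t ht hts
    · by_cases hct : c ∈ t
      · rw [dsel, if_neg (fun h => by rw [ht c hct] at h; exact absurd h.1 (by simp)), dsel,
          if_neg (fun h => h.2 (List.mem_append.mpr (Or.inr hct)))]
        exact ih s t ht hts
      · have hcst : c ∉ s ++ t := by simp [hcs, hct]
        by_cases hpc : p c = true
        · rw [dsel, if_pos ⟨hpc, hcs⟩, dsel, if_pos ⟨rfl, hcst⟩]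
          have heq : dsel (fun _ => true) cs ((s ++ t) ++ [c]) =
              dsel (fun _ => true) cs ((s ++ [c]) ++ t) := by
            apply dsel_congr
            intro x; simp only [List.mem_append, List.mem_singleton]; tauto
          rw [heq]
          refine List.Sublist.cons₂ c (ih (s ++ [c]) t ht (fun x hx => ?_))
          simp only [List.mem_append, List.mem_singleton, not_or]
          exact ⟨hts x hx, fun h => hct (h ▸ hx)⟩
        · have hpc' : p c = false := by simpa using hpc
          rw [dsel, if_neg (fun h => hpc (h.1)), dsel, if_pos ⟨rfl, hcst⟩]
          have heq : dsel (fun _ => true) cs ((s ++ t) ++ [c]) =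
              dsel (fun _ => true) cs (s ++ (t ++ [c])) := by
            apply dsel_congr; intro x; simp only [List.mem_append, List.mem_singleton]; tauto
          rw [heq]
          refine List.Sublist.cons c (ih s (t ++ [c]) ?_ ?_)
          · intro x hx; rcases List.mem_append.mp hx with h | h
            · exact ht x h
            · simp only [List.mem_singleton] at h; subst h; exact hpc'
          · intro x hx; rcases List.mem_append.mp hx with h | h
            · exact hts x h
            · simp only [List.mem_singleton] at h; subst h; exact hcs

-- (9) dsel of a duplicate-free list with disjoint seen is the list itself
theorem dsel_all_of_nodup (l : List String) (s : List String)
    (hl : l.Nodup) (hd : ∀ x ∈ l, x ∉ s) : dsel (fun _ => true) l s = l := by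
  induction l generalizing s with
  | nil => rfl
  | cons c cs ih =>
    have hcs : c ∉ s := hd c (List.mem_cons_self ..)
    rw [dsel, if_pos ⟨rfl, hcs⟩]
    rw [ih (s ++ [c]) (List.Nodup.of_cons hl) (fun x hx => ?_)]
    simp only [List.mem_append, List.mem_singleton, not_or]
    exact ⟨hd x (List.mem_cons_of_mem _ hx), fun h => (List.nodup_cons.mp hl).1 (h ▸ hx)⟩

-- (8) an unfiltered pass with seen s is the pass from empty seen, filtered by ∉ s
theorem dsel_eq_filter (l : List String) (s t : List String) (hts : ∀ x ∈ t, x ∈ s) :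
    dsel (fun _ => true) l s = (dsel (fun _ => true) l t).filter (fun c => !(s.contains c)) := by
  induction l generalizing s t with
  | nil => simp [dsel]
  | cons c cs ih =>
    by_cases hcs : c ∈ s
    · rw [dsel, if_neg (fun h => h.2 hcs)]
      by_cases hct : c ∈ t
      · rw [dsel, if_neg (fun h => h.2 hct)]
        exact ih s t hts
      · rw [dsel, if_pos ⟨rfl, hct⟩, List.filter_cons,
          if_neg (show ¬((!(s.contains c)) = true) by simp [hcs])]
        exact ih s (t ++ [c]) (by
          intro x hx; rcases List.mem_append.mp hx with h | h
          · exact hts x h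
          · simp only [List.mem_singleton] at h; subst h; exact hcs)
    · have hct : c ∉ t := fun h => hcs (hts c h)
      rw [dsel, if_pos ⟨rfl, hcs⟩, dsel, if_pos ⟨rfl, hct⟩, List.filter_cons,
        if_pos (show (!(s.contains c)) = true by simp [hcs])]
      congr 1
      rw [ih (s ++ [c]) (t ++ [c]) (by
        intro x hx; rcases List.mem_append.mp hx with h | h
        · exact List.mem_append.mpr (Or.inl (hts x h))
        · exact List.mem_append.mpr (Or.inr h))]
      apply List.filter_congr
      intro x hx
      have hxc : x ≠ c := by
        intro h; subst h
        exact ((mem_dsel _ _ _ _).mp hx).2.2 (List.mem_append.mpr (Or.inr (by simp)))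
      simp [List.mem_append, hxc]

-- A's loops are dsel passes
theorem foldl_loop_eq_dsel (p : String → Bool) (l : List String) (s acc : List String) :
    l.foldl (fun (st : PySem.Set String × List String) code =>
        if p code && !(PySem.Set.contains st.1 code) then
          (PySem.Set.add st.1 code, st.2 ++ [code])
        else st) (s, acc)
      = (s ++ dsel p l s, acc ++ dsel p l s) := by
  induction l generalizing s acc with
  | nil => simp [dsel]
  | cons c cs ih =>
    by_cases hic : p c = true ∧ c ∉ s
    · have hadd : PySem.Set.add s c = s ++ [c] := by
        simp [PySem.Set.add, hic.2]
      rw [List.foldl_cons, dsel, if_pos hic,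
        if_pos (show (p c && !(PySem.Set.contains s c)) = true by simp [PySem.Set.contains, hic.1, hic.2]),
        hadd, ih]
      simp
    · have hb : ¬((p c && !(PySem.Set.contains s c)) = true) := by
        intro hcond
        rw [Bool.and_eq_true] at hcond
        refine hic ⟨hcond.1, fun hm => ?_⟩
        rw [ctm hm] at hcond
        simp at hcond
      rw [List.foldl_cons, dsel, if_neg hic, if_neg hb, ih s acc]

theorem foldl_loop2_eq_dsel (l : List String) (s acc : List String) :
    l.foldl (fun (st : PySem.Set String × List String) code =>
        if !(PySem.Set.contains st.1 code) then
          (PySem.Set.add st.1 code, st.2 ++ [code])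
        else st) (s, acc)
      = (s ++ dsel (fun _ => true) l s, acc ++ dsel (fun _ => true) l s) := by
  have h := foldl_loop_eq_dsel (fun _ => true) l s acc
  simpa using h

-- dedup is the unfiltered pass from empty seen
theorem foldl_set_add_eq (l : List String) (s : List String) :
    l.foldl PySem.Set.add s = s ++ dsel (fun _ => true) l s := by
  induction l generalizing s with
  | nil => simp [dsel]
  | cons c cs ih =>
    by_cases hcs : c ∈ s
    · have hadd : PySem.Set.add s c = s := by
        simp [PySem.Set.add, hcs]
      rw [List.foldl_cons, dsel, if_neg (fun h => h.2 hcs), hadd, ih]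
    · have hadd : PySem.Set.add s c = s ++ [c] := by
        simp [PySem.Set.add, hcs]
      rw [List.foldl_cons, dsel, if_pos ⟨rfl, hcs⟩, hadd, ih]
      simp

theorem dedup_eq_dsel (l : List String) :
    PySem.List.dedup l = dsel (fun _ => true) l [] := by
  rw [PySem.List.dedup_eq_ofList, PySem.Set.ofList_eq_foldl, foldl_set_add_eq]
  simp

-- the rank dictionary: items (c₀, n), (c₁, n+1), …
def ritems : List String → Int → List (String × Int)
  | [], _ => []
  | c :: cs, n => (c, n) :: ritems cs (n + 1)

def rdict (ks : List String) (n : Int) : PySem.Dict String Int := PySem.Dict.mk (ritems ks n)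

theorem ritems_append (ks : List String) (c : String) (n : Int) :
    ritems (ks ++ [c]) n = ritems ks n ++ [(c, n + ks.length)] := by
  induction ks generalizing n with
  | nil => simp [ritems]
  | cons a as ih =>
    have hkey : ((n + 1) + (as.length : Int)) = n + (((as.length + 1 : Nat)) : Int) := by
      push_cast
      ring
    show (a, n) :: ritems (as ++ [c]) (n + 1)
        = (a, n) :: ritems as (n + 1) ++ [(c, n + ((a :: as).length : Int))]
    rw [ih (n + 1), List.length_cons, ← hkey]
    simp

theorem keys_rdict (ks : List String) (n : Int) : (rdict ks n).keys = ks := by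
  induction ks generalizing n with
  | nil => rfl
  | cons a as ih =>
    have h := ih (n + 1)
    simp only [rdict, PySem.Dict.keys] at h ⊢
    simp only [ritems, List.map_cons, h]

theorem size_rdict (ks : List String) (n : Int) : PySem.Dict.size (rdict ks n) = ks.length := by
  have := congrArg List.length (keys_rdict ks n)
  simpa [PySem.Dict.keys, PySem.Dict.size] using this

-- the setdefault loop builds exactly rdict of the distinct new keys
theorem foldl_setdefault_eq_rdict (l : List String) (ks : List String) (hks : ks.Nodup) :
    l.foldl (fun d code => PySem.Dict.setdefault d code ((PySem.Dict.size d : Int))) (rdict ks 0)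
      = rdict (ks ++ dsel (fun _ => true) l ks) 0 := by
  induction l generalizing ks with
  | nil => simp [dsel]
  | cons c cs ih =>
    by_cases hcs : c ∈ ks
    · have hcont : (rdict ks 0).contains c = true := by
        rw [PySem.Dict.contains_iff_mem_keys, keys_rdict]; exact hcs
      rw [List.foldl_cons, dsel, if_neg (fun h => h.2 hcs),
        PySem.Dict.setdefault_of_contains _ _ hcont]
      exact ih ks hks
    · have hcont : (rdict ks 0).contains c = false := by
        rw [← Bool.not_eq_true, PySem.Dict.contains_iff_mem_keys, keys_rdict]; exact hcs
      have hins : PySem.Dict.setdefault (rdict ks 0) c ((PySem.Dict.size (rdict ks 0) : Int))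
          = rdict (ks ++ [c]) 0 := by
        rw [PySem.Dict.setdefault_of_not_contains _ _ hcont]
        apply PySem.Dict.ext
        rw [PySem.Dict.items_insert_of_not_contains _ _ hcont]
        show ritems ks 0 ++ [(c, (PySem.Dict.size (rdict ks 0) : Int))] = ritems (ks ++ [c]) 0
        rw [ritems_append, size_rdict]
        simp
      rw [List.foldl_cons, dsel, if_pos ⟨rfl, hcs⟩, hins,
        ih (ks ++ [c]) (nodup_snoc ks c hks hcs)]
      simp

theorem getD_rdict_getElem (ks : List String) (hks : ks.Nodup) (i : Nat) (hi : i < ks.length)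
    (n : Int) : PySem.Dict.getD (rdict ks n) ks[i] 0 = n + i := by
  induction ks generalizing i n with
  | nil => simp at hi
  | cons a as ih =>
    cases i with
    | zero =>
      simp only [List.getElem_cons_zero]
      rw [PySem.Dict.getD_eq_get?_getD]
      simp [rdict, ritems, PySem.Dict.get?_mk_cons]
    | succ j =>
      have hj : j < as.length := by simpa using hi
      have hne : a ≠ as[j] := by
        intro h
        exact (List.nodup_cons.mp hks).1 (h ▸ List.getElem_mem hj)
      have hstep : PySem.Dict.getD (rdict (a :: as) n) as[j] 0
          = PySem.Dict.getD (rdict as (n + 1)) as[j] 0 := by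
        rw [PySem.Dict.getD_eq_get?_getD, PySem.Dict.getD_eq_get?_getD]
        simp only [rdict, ritems, PySem.Dict.get?_mk_cons]
        simp [hne]
      rw [List.getElem_cons_succ, hstep, ih (List.Nodup.of_cons hks) j hj (n + 1)]
      push_cast
      ring

theorem pairwise_rank (ks : List String) (hks : ks.Nodup) :
    ks.Pairwise (fun a b => PySem.Dict.getD (rdict ks 0) a 0 < PySem.Dict.getD (rdict ks 0) b 0) := by
  rw [List.pairwise_iff_getElem]
  intro i j hi hj hij
  rw [getD_rdict_getElem ks hks i hi 0, getD_rdict_getElem ks hks j hj 0]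
  simp only [Int.zero_add]
  exact_mod_cast hij

-- main equivalence, over the common normalized candidate and valid lists
theorem core (p : String → Bool) (C V : List String) (hp : ∀ x, p x = true ↔ x ∈ V) :
    (V.foldl (fun (st : PySem.Set String × List String) code =>
        if !(PySem.Set.contains st.1 code) then (PySem.Set.add st.1 code, st.2 ++ [code]) else st)
      (C.foldl (fun (st : PySem.Set String × List String) code =>
        if p code && !(PySem.Set.contains st.1 code) then (PySem.Set.add st.1 code, st.2 ++ [code]) else st)
        (PySem.Set.empty, []))).2
    = PySem.List.sorted (PySem.List.dedup V)
        (fun code => PySem.Dict.getD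
          ((C ++ PySem.List.dedup V).foldl
            (fun d code => PySem.Dict.setdefault d code ((PySem.Dict.size d : Int))) PySem.Dict.empty)
          code 0) := by
  set P1 := dsel p C [] with hP1
  set P2 := dsel (fun _ => true) V P1 with hP2
  set deduped := PySem.List.dedup V with hdeduped
  set D := dsel (fun _ => true) (C ++ deduped) [] with hD
  -- A's side computes P1 ++ P2
  have hA : (V.foldl (fun (st : PySem.Set String × List String) code =>
        if !(PySem.Set.contains st.1 code) then (PySem.Set.add st.1 code, st.2 ++ [code]) else st)
      (C.foldl (fun (st : PySem.Set String × List String) code =>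
        if p code && !(PySem.Set.contains st.1 code) then (PySem.Set.add st.1 code, st.2 ++ [code]) else st)
        (PySem.Set.empty, []))).2 = P1 ++ P2 := by
    rw [show (PySem.Set.empty, ([] : List String)) = (([] : List String), ([] : List String)) from rfl]
    rw [foldl_loop_eq_dsel p C [] []]
    simp only [List.nil_append]
    rw [foldl_loop2_eq_dsel V P1 P1]
  -- B's rank dict is rdict D 0
  have hrank : (C ++ deduped).foldl
      (fun d code => PySem.Dict.setdefault d code ((PySem.Dict.size d : Int))) PySem.Dict.empty
      = rdict D 0 := by
    rw [show (PySem.Dict.empty : PySem.Dict String Int) = rdict [] 0 from rfl,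
      foldl_setdefault_eq_rdict (C ++ deduped) [] List.nodup_nil]
    simp only [List.nil_append, hD]
  rw [hA, hrank]
  -- facts
  have hVnodup : deduped.Nodup := PySem.List.nodup_dedup V
  have hP1nodup : P1.Nodup := by
    have := nodup_append_dsel p C [] List.nodup_nil
    simpa using this
  have hDnodup : D.Nodup := by
    have := nodup_append_dsel (fun _ => true) (C ++ deduped) [] List.nodup_nil
    simpa [hD] using this
  have hmemP1 : ∀ x, x ∈ P1 ↔ x ∈ C ∧ x ∈ V := by
    intro x
    rw [hP1, mem_dsel]
    simp [hp x]
  have hmemP2 : ∀ x, x ∈ P2 ↔ x ∈ V ∧ x ∉ P1 := by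
    intro x
    rw [hP2, mem_dsel]
    simp
  -- out is a permutation of deduped
  have hperm : (P1 ++ P2).Perm deduped := by
    rw [List.perm_ext_iff_of_nodup ?_ hVnodup]
    · intro x
      rw [List.mem_append, hmemP1, hmemP2, hdeduped, PySem.List.mem_dedup]
      by_cases hxP1 : x ∈ P1
      · have := (hmemP1 x).mp hxP1
        tauto
      · tauto
    · have := nodup_append_dsel (fun _ => true) V P1 hP1nodup
      have hdisj : ∀ x ∈ P1, x ∉ P2 := by
        intro x hx hx2
        exact ((hmemP2 x).mp hx2).2 hx
      rw [List.nodup_append] at this ⊢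
      exact ⟨this.1, this.2.1, fun a ha b hb hab => hdisj a ha (hab ▸ hb)⟩
  -- out is a sublist of D
  have hD_split : D = dsel (fun _ => true) C [] ++ dsel (fun _ => true) deduped (dsel (fun _ => true) C []) := by
    rw [hD, dsel_append]
    simp
  have hsub1 : List.Sublist P1 (dsel (fun _ => true) C []) := by
    have := dsel_sublist_aux p C [] [] (by simp) (by simp)
    simpa using this
  have hchunk2 : P2 = dsel (fun _ => true) deduped (dsel (fun _ => true) C []) := by
    have h1 : P2 = deduped.filter (fun c => !(P1.contains c)) := by
      rw [hP2, dsel_eq_filter V P1 [] (by simp), ← dedup_eq_dsel, ← hdeduped]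
    have h2 : dsel (fun _ => true) deduped (dsel (fun _ => true) C []) =
        (dsel (fun _ => true) deduped []).filter (fun c => !((dsel (fun _ => true) C []).contains c)) := by
      rw [dsel_eq_filter deduped (dsel (fun _ => true) C []) [] (by simp)]
    have h3 : dsel (fun _ => true) deduped [] = deduped :=
      dsel_all_of_nodup deduped [] hVnodup (by simp)
    rw [h1, h2, h3]
    apply List.filter_congr
    intro x hx
    have hxV : x ∈ V := by
      rw [hdeduped, PySem.List.mem_dedup] at hx
      exact hx
    have hiff : x ∈ P1 ↔ x ∈ dsel (fun _ => true) C [] := by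
      rw [hmemP1, mem_dsel]
      simp [hxV]
    by_cases hm : x ∈ P1
    · rw [ltm hm, ltm (hiff.mp hm)]
    · rw [ltn hm, ltn (fun h => hm (hiff.mpr h))]
  have hsub : List.Sublist (P1 ++ P2) D := by
    rw [hD_split, hchunk2]
    exact List.Sublist.append hsub1 (List.Sublist.refl _)
  -- out is strictly increasing in rank
  have hpair : (P1 ++ P2).Pairwise
      (fun a b => PySem.Dict.getD (rdict D 0) a 0 < PySem.Dict.getD (rdict D 0) b 0) :=
    List.Pairwise.sublist hsub (pairwise_rank D hDnodup)
  exact (PySem.List.sorted_eq_of_perm_of_pairwise_lt _ _ _ hperm hpair).symm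

theorem normalize_ranking_eq (best_candidate : String) (ranked_candidates : List String)
    (valid_codes : List String) :
    normalize_ranking_py best_candidate ranked_candidates valid_codes
      = normalize_ranking_py_alt best_candidate ranked_candidates valid_codes :=
  core (fun code => (valid_codes.map PySem.Str.lower).contains code)
    (PySem.Str.lower best_candidate :: ranked_candidates.map PySem.Str.lower)
    (valid_codes.map PySem.Str.lower)
    (fun _ => contains_true_iff)

-- ===== VERDICT (by name: the statement is the Claim_ definition above) =====
theorem normalize_ranking_py_spec : Claim_equal_normalize_ranking_py := by
  intro best_candidate ranked_candidates valid_codes _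
  exact normalize_ranking_eq best_candidate ranked_candidates valid_codes
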